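-- pv_equiv track=rewrite | github.com/BlackCloud-K/manual-rag-system | src/parser/chunk_builder.py | _find_title_substring_index
-- ===== SOURCE A (Python) =====
-- def _normalize_for_title_match(text: str) -> str:
--     """Strip all whitespace so TOC titles match PDF lines like 'F-15 在战场'."""
--     return "".join(ch for ch in (text or "") if not ch.isspace())
--
-- def _find_title_substring_index(block_text: str, title: str) -> int:
--     """First index in *block_text* where normalized remainder starts with *title*."""
--     title_clean = (title or "").strip()
--     nt = _normalize_for_title_match(title_clean)
--     if not nt:
--         return -1
--     block_text = block_text or ""
--     for i in range(len(block_text) + 1):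
--         suffix = block_text[i:]
--         if _normalize_for_title_match(suffix).startswith(nt):
--             return i
--     return -1
-- ===== SOURCE B (Python) =====
-- def _find_title_substring_index(block_text: str, title: str) -> int:
--     """First index in *block_text* where normalized remainder starts with *title*."""
--     nt = "".join(ch for ch in (title or "") if not ch.isspace())
--     if not nt:
--         return -1
--     block_text = block_text or ""
--     positions = [i for i, ch in enumerate(block_text) if not ch.isspace()]
--     nb = "".join(block_text[i] for i in positions)
--     p = nb.find(nt)
--     if p == -1:
--         return -1
--     return 0 if p == 0 else positions[p - 1] + 1
-- ===== Notes on version B (the rewrite author's own statement) =====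
-- stated objective: faster
-- what changed: Instead of re-normalizing every suffix of block_text and testing startswith (quadratic), B normalizes the block once while recording each kept character's original index, does a single substring find of the normalized title, and maps the match position back to the smallest original index.
import Mathlib
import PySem

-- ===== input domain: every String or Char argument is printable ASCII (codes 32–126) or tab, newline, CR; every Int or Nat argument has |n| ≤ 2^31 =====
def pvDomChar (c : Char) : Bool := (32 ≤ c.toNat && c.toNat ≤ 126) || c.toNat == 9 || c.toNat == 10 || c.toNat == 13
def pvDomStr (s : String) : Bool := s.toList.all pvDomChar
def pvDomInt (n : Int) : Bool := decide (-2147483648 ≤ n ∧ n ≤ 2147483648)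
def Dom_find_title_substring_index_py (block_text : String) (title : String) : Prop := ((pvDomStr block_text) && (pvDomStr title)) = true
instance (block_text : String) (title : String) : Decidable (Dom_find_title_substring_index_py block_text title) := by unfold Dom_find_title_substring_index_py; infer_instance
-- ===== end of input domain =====

-- B replaces A's rescan of every suffix by one normalization pass with an index map and a
-- single substring find, mapping the match back to the smallest original index (objective: faster).

-- ===== PORT A =====
-- port of _normalize_for_title_match: keep exactly the non-whitespace characters
def pvNorm (text : List Char) : List Char :=
  text.filter (fun ch => !(PySem.Chars.isspace ch))

-- A's for-loop over range(len(block_text)+1) with early return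
def pvLoopA (block nt : List Char) : List Nat → Int
  | [] => -1
  | i :: rest =>
    let suffix := PySem.List.slice block (some (i : Int)) none
    if PySem.Chars.startswith (pvNorm suffix) nt then (i : Int) else pvLoopA block nt rest

def find_title_substring_index_py (block_text : String) (title : String) : Int :=
  let title_clean := PySem.Str.strip title
  let nt := pvNorm title_clean.toList
  if nt = [] then -1
  else pvLoopA block_text.toList nt (List.range (block_text.toList.length + 1))

-- ===== PORT B =====
-- (position, char) pairs of the non-whitespace characters; find nt once in the normalized
-- text; map the match position back to the original index.
-- The pyGet? is always `some` here (0 < p and p - 1 < number of kept chars); .getD 0 only totalizes it.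
def pvAltCore (nt l : List Char) : Int :=
  let pairs := (PySem.List.enumerate l).filter (fun p => !(PySem.Chars.isspace p.2))
  let p := PySem.Chars.find (pairs.map (fun q => q.2)) nt
  if p = -1 then -1
  else if p = 0 then 0
  else (PySem.List.pyGet? (pairs.map (fun q => q.1)) (p - 1)).getD 0 + 1

def find_title_substring_index_py_alt (block_text : String) (title : String) : Int :=
  let nt := title.toList.filter (fun ch => !(PySem.Chars.isspace ch))
  if nt = [] then -1
  else pvAltCore nt block_text.toList

-- ===== PRECONDITION & SPEC =====
def Spec_find_title_substring_index_py (block_text : String) (title : String) (out : Int) : Prop := out = find_title_substring_index_py_alt block_text title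
instance (block_text : String) (title : String) (out : Int) : Decidable (Spec_find_title_substring_index_py block_text title out) := by unfold Spec_find_title_substring_index_py; infer_instance

-- ===== CLAIM (what is proved, stated in full; the proofs are below) =====
def Claim_equal_find_title_substring_index_py : Prop := ∀ (block_text : String) (title : String), Dom_find_title_substring_index_py block_text title → Spec_find_title_substring_index_py block_text title (find_title_substring_index_py block_text title)

-- ===== LEMMAS AND PROOFS =====

-- A's loop, written as structural recursion on the text (proof-side reference function)
def pvAux (nt : List Char) : List Char → Int
  | [] => -1
  | c :: t =>
    if PySem.Chars.startswith (pvNorm (c :: t)) nt then 0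
    else if pvAux nt t = -1 then -1 else pvAux nt t + 1

-- positions of the kept characters, with general start offset (proof-side)
def pvPs (l : List Char) (s : Int) : List Int :=
  ((PySem.List.enumerate l s).filter (fun p => !(PySem.Chars.isspace p.2))).map (fun q => q.1)

-- stripping whitespace first does not change the whitespace-free normalization
lemma pvNorm_dropWhile (cs : List Char) :
    pvNorm (cs.dropWhile PySem.Chars.isspace) = pvNorm cs := by
  induction cs with
  | nil => rfl
  | cons c t ih =>
    by_cases hc : PySem.Chars.isspace c <;>
      simp [pvNorm, List.dropWhile_cons, hc] at ih ⊢ <;> simp [ih]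

lemma pvNorm_strip (cs : List Char) : pvNorm (PySem.Chars.strip cs) = pvNorm cs := by
  have hrev : ∀ l : List Char, pvNorm l.reverse = (pvNorm l).reverse := by
    intro l; simp [pvNorm, List.filter_reverse]
  calc pvNorm (PySem.Chars.strip cs)
      = pvNorm (((cs.dropWhile PySem.Chars.isspace).reverse.dropWhile PySem.Chars.isspace).reverse) := rfl
    _ = pvNorm cs := by
        rw [hrev, pvNorm_dropWhile, hrev, List.reverse_reverse, pvNorm_dropWhile]

lemma pvLoopA_shift (c : Char) (t nt : List Char) (idxs : List Nat) :
    pvLoopA (c :: t) nt (idxs.map Nat.succ) =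
      (if pvLoopA t nt idxs = -1 then -1 else pvLoopA t nt idxs + 1) := by
  induction idxs with
  | nil => simp [pvLoopA]
  | cons i rest ih =>
    have hs : PySem.List.slice (c :: t) (some ((Nat.succ i : Nat) : Int)) none
        = List.drop i t := by
      rw [PySem.List.slice_from _ (Int.natCast_nonneg _)]
      simp
    have hs' : PySem.List.slice t (some ((i : Nat) : Int)) none = List.drop i t := by
      rw [PySem.List.slice_from _ (Int.natCast_nonneg _)]
      simp
    simp only [List.map_cons, pvLoopA, hs, hs']
    by_cases hcond : PySem.Chars.startswith (pvNorm (List.drop i t)) nt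
    · have hne : ¬ ((i : Int) = -1) := by omega
      simp [hcond, hne]
    · simp [hcond, ih]

lemma pvLoopA_eq_pvAux (nt : List Char) (hnt : nt ≠ []) (l : List Char) :
    pvLoopA l nt (List.range (l.length + 1)) = pvAux nt l := by
  induction l with
  | nil =>
    have hsl : PySem.List.slice ([] : List Char) (some (0 : Int)) none = [] := rfl
    have h0 : ¬ PySem.Chars.startswith (pvNorm ([] : List Char)) nt = true := by
      rw [PySem.Chars.startswith_iff]
      simp only [pvNorm, List.filter_nil, List.prefix_nil]
      exact hnt
    have hr : List.range (List.length ([] : List Char) + 1) = [0] := rfl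
    rw [hr]
    simp [pvLoopA, pvAux, hsl, h0]
  | cons c t ih =>
    rw [List.length_cons, List.range_succ_eq_map]
    have hs0 : PySem.List.slice (c :: t) (some ((0 : Nat) : Int)) none = c :: t := by
      rw [PySem.List.slice_from _ (Int.natCast_nonneg _)]; simp
    simp only [Nat.cast_zero] at hs0
    simp only [pvLoopA, Nat.cast_zero, hs0]
    by_cases hcond : PySem.Chars.startswith (pvNorm (c :: t)) nt
    · simp [pvAux, hcond]
    · rw [if_neg hcond, pvLoopA_shift, ih]
      simp [pvAux, hcond]

-- first-occurrence recursion for Chars.find, from its spec lemmas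
lemma pv_find_cons (nt nb : List Char) (x : Char) (hnt : nt ≠ []) :
    PySem.Chars.find (x :: nb) nt =
      if nt <+: (x :: nb) then 0
      else if PySem.Chars.find nb nt = -1 then -1 else PySem.Chars.find nb nt + 1 := by
  by_cases hp : nt <+: (x :: nb)
  · rw [if_pos hp]
    have h0 : 0 ≤ PySem.Chars.find (x :: nb) nt :=
      (PySem.Chars.find_nonneg_iff _ _).2 hp.isInfix
    obtain ⟨hpre, hmin⟩ := PySem.Chars.find_spec h0
    by_contra hne
    have hk : 0 < (PySem.Chars.find (x :: nb) nt).toNat := by omega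
    exact hmin 0 hk (by simpa using hp)
  · rw [if_neg hp]
    by_cases hnb : PySem.Chars.find nb nt = -1
    · rw [if_pos hnb]
      rw [PySem.Chars.find_eq_neg_one_iff] at hnb ⊢
      intro hinf
      rcases (List.infix_cons_iff).1 hinf with h | h
      · exact hp h
      · exact hnb h
    · rw [if_neg hnb]
      have hr0 : 0 ≤ PySem.Chars.find nb nt := by
        have := PySem.Chars.neg_one_le_find nb nt
        omega
      obtain ⟨hrpre, hrmin⟩ := PySem.Chars.find_spec hr0
      have hinf : nt <:+: (x :: nb) :=
        (List.infix_cons_iff).2 (Or.inr (hrpre.isInfix.trans (List.drop_suffix _ nb).isInfix))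
      have hfin : 0 ≤ PySem.Chars.find (x :: nb) nt :=
        (PySem.Chars.find_nonneg_iff _ _).2 hinf
      obtain ⟨hpre, hmin⟩ := PySem.Chars.find_spec hfin
      have hk0 : (PySem.Chars.find (x :: nb) nt).toNat ≠ 0 := by
        intro h
        rw [h] at hpre
        exact hp (by simpa using hpre)
      have hpre' : nt <+: List.drop ((PySem.Chars.find (x :: nb) nt).toNat - 1) nb := by
        have hd : List.drop (PySem.Chars.find (x :: nb) nt).toNat (x :: nb)
            = List.drop ((PySem.Chars.find (x :: nb) nt).toNat - 1) nb := by
          rcases Nat.exists_eq_succ_of_ne_zero hk0 with ⟨m, hm⟩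
          rw [hm]; simp
        rwa [hd] at hpre
      have h1 : (PySem.Chars.find nb nt).toNat ≤ (PySem.Chars.find (x :: nb) nt).toNat - 1 := by
        by_contra h
        exact hrmin _ (by omega) hpre'
      have h2 : (PySem.Chars.find (x :: nb) nt).toNat ≤ (PySem.Chars.find nb nt).toNat + 1 := by
        by_contra h
        refine hmin ((PySem.Chars.find nb nt).toNat + 1) (by omega) ?_
        simpa using hrpre
      omega

-- the kept characters are the normalization, at any offset
lemma pvEnum_snd (l : List Char) (s : Int) :
    (((PySem.List.enumerate l s).filter (fun p => !(PySem.Chars.isspace p.2))).map (fun q => q.2))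
      = pvNorm l := by
  induction l generalizing s with
  | nil => simp [PySem.List.enumerate_nil, pvNorm]
  | cons c t ih =>
    rw [PySem.List.enumerate_cons]
    by_cases hc : PySem.Chars.isspace c
    · simpa [pvNorm, hc] using ih (s + 1)
    · simpa [pvNorm, hc] using ih (s + 1)

lemma pvPs_shift (l : List Char) (s : Int) :
    pvPs l (s + 1) = (pvPs l s).map (· + 1) := by
  induction l generalizing s with
  | nil => simp [pvPs, PySem.List.enumerate_nil]
  | cons c t ih =>
    simp only [pvPs] at ih ⊢
    rw [PySem.List.enumerate_cons, PySem.List.enumerate_cons]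
    by_cases hc : PySem.Chars.isspace c
    · rw [List.filter_cons_of_neg (by simp [hc]), List.filter_cons_of_neg (by simp [hc])]
      exact ih (s + 1)
    · rw [List.filter_cons_of_pos (by simp [hc]), List.filter_cons_of_pos (by simp [hc]),
        List.map_cons, List.map_cons, List.map_cons]
      rw [ih (s + 1)]

lemma pvPs_nonneg (l : List Char) (s : Int) (hs : 0 ≤ s) :
    ∀ x ∈ pvPs l s, 0 ≤ x := by
  induction l generalizing s with
  | nil => simp [pvPs, PySem.List.enumerate_nil]
  | cons c t ih =>
    intro x hx
    simp only [pvPs] at hx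
    rw [PySem.List.enumerate_cons] at hx
    by_cases hc : PySem.Chars.isspace c
    · rw [List.filter_cons_of_neg (by simp [hc])] at hx
      exact ih (s + 1) (by omega) x hx
    · rw [List.filter_cons_of_pos (by simp [hc]), List.map_cons] at hx
      rcases List.mem_cons.1 hx with rfl | hx
      · exact hs
      · exact ih (s + 1) (by omega) x hx

lemma pvPs_length (l : List Char) (s : Int) :
    (pvPs l s).length = (pvNorm l).length := by
  rw [pvPs, List.length_map, ← pvEnum_snd l s, List.length_map]

-- pvAltCore rewritten through pvNorm and pvPs
lemma pvAltCore_eq (nt l : List Char) :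
    pvAltCore nt l =
      (if PySem.Chars.find (pvNorm l) nt = -1 then -1
       else if PySem.Chars.find (pvNorm l) nt = 0 then 0
       else (PySem.List.pyGet? (pvPs l 0) (PySem.Chars.find (pvNorm l) nt - 1)).getD 0 + 1) := by
  simp only [pvAltCore, pvPs, pvEnum_snd]

-- a successful find with a nonempty needle points inside the haystack
lemma pv_find_lt_length (s sub : List Char) (hsub : sub ≠ [])
    (h : 0 ≤ PySem.Chars.find s sub) : (PySem.Chars.find s sub).toNat < s.length := by
  obtain ⟨hpre, -⟩ := PySem.Chars.find_spec h
  by_contra hle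
  push_neg at hle
  rw [List.drop_eq_nil_of_le hle] at hpre
  exact hsub (List.prefix_nil.1 hpre)

lemma pv_pyGet?_pos (xs : List Int) (p : Int) (hp : 0 < p)
    (hlt : p.toNat - 1 < xs.length) :
    PySem.List.pyGet? xs (p - 1) = some (xs[p.toNat - 1]) := by
  have h : p - 1 = ((p.toNat - 1 : Nat) : Int) := by omega
  rw [h, PySem.List.pyGet?_natCast, List.getElem?_eq_getElem hlt]

lemma pv_pyGet?_cons_pos (x : Int) (xs : List Int) (k : Nat) (hlt : k < xs.length) :
    PySem.List.pyGet? (x :: xs.map (· + 1)) ((k : Int) + 1) = some (xs[k] + 1) := by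
  have h : (k : Int) + 1 = ((k + 1 : Nat) : Int) := by omega
  rw [h, PySem.List.pyGet?_natCast, List.getElem?_cons_succ, List.getElem?_map,
    List.getElem?_eq_getElem hlt]
  rfl

-- main: pvAux equals B's core
lemma pvAux_eq_altCore (nt : List Char) (hnt : nt ≠ []) (l : List Char) :
    pvAux nt l = pvAltCore nt l := by
  induction l with
  | nil =>
    rw [pvAltCore_eq]
    have hm : PySem.Chars.find (pvNorm []) nt = -1 := by
      rw [PySem.Chars.find_eq_neg_one_iff]
      intro h
      simp only [pvNorm, List.filter_nil] at h
      exact hnt (List.eq_nil_of_infix_nil h)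
    simp [pvAux, hm]
  | cons c t ih =>
    rw [pvAltCore_eq] at ih
    rw [pvAltCore_eq]
    by_cases hc : PySem.Chars.isspace c
    · -- whitespace head: normalization unchanged, positions shift by one
      have hNorm : pvNorm (c :: t) = pvNorm t := by simp [pvNorm, hc]
      have hPs : pvPs (c :: t) 0 = (pvPs t 0).map (· + 1) := by
        rw [pvPs, PySem.List.enumerate_cons, List.filter_cons_of_neg (by simp [hc])]
        have : pvPs t (0 + 1) = (pvPs t 0).map (· + 1) := pvPs_shift t 0
        simpa [pvPs] using this
      simp only [pvAux]
      rw [hNorm, hPs]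
      by_cases hpm : PySem.Chars.find (pvNorm t) nt = -1
      · have hnp : ¬ PySem.Chars.startswith (pvNorm t) nt = true := by
          rw [PySem.Chars.startswith_iff]
          intro hpre
          exact ((PySem.Chars.find_eq_neg_one_iff _ _).1 hpm) hpre.isInfix
        rw [if_neg hnp, ih]
        simp [hpm]
      · have hp0 : 0 ≤ PySem.Chars.find (pvNorm t) nt := by
          have := PySem.Chars.neg_one_le_find (pvNorm t) nt; omega
        obtain ⟨hpre, hmin⟩ := PySem.Chars.find_spec hp0
        by_cases hpz : PySem.Chars.find (pvNorm t) nt = 0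
        · have hsw : PySem.Chars.startswith (pvNorm t) nt = true := by
            rw [PySem.Chars.startswith_iff]
            have : (PySem.Chars.find (pvNorm t) nt).toNat = 0 := by omega
            rw [this] at hpre
            simpa using hpre
          rw [if_pos hsw, if_neg hpm, if_pos hpz]
        · have hppos : 0 < PySem.Chars.find (pvNorm t) nt := by omega
          have hsw : ¬ PySem.Chars.startswith (pvNorm t) nt = true := by
            rw [PySem.Chars.startswith_iff]
            intro hp
            exact hmin 0 (by omega) (by simpa using hp)
          have hlen := pv_find_lt_length (pvNorm t) nt hnt hp0
          have hlt : (PySem.Chars.find (pvNorm t) nt).toNat - 1 < (pvPs t 0).length := by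
            rw [pvPs_length]; omega
          have hget := pv_pyGet?_pos (pvPs t 0) _ hppos hlt
          have hltm : (PySem.Chars.find (pvNorm t) nt).toNat - 1 < ((pvPs t 0).map (· + 1)).length := by
            rw [List.length_map]; exact hlt
          have hgetm : PySem.List.pyGet? ((pvPs t 0).map (· + 1)) (PySem.Chars.find (pvNorm t) nt - 1)
              = some ((pvPs t 0)[(PySem.Chars.find (pvNorm t) nt).toNat - 1] + 1) := by
            rw [pv_pyGet?_pos _ _ hppos hltm]
            congr 1
            rw [List.getElem_map]
          have hw0 : 0 ≤ (pvPs t 0)[(PySem.Chars.find (pvNorm t) nt).toNat - 1] :=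
            pvPs_nonneg t 0 le_rfl _ (List.getElem_mem _)
          rw [if_neg hsw, ih, if_neg hpm, if_neg hpz, hget, if_neg hpm, if_neg hpz, hgetm]
          have hne : ¬ ((some ((pvPs t 0)[(PySem.Chars.find (pvNorm t) nt).toNat - 1])).getD 0 + 1 = -1) := by
            simp only [Option.getD_some]; omega
          rw [if_neg hne]
          simp only [Option.getD_some]
    · -- kept head: normalization and positions grow by one element
      have hNorm : pvNorm (c :: t) = c :: pvNorm t := by simp [pvNorm, hc]
      have hPs : pvPs (c :: t) 0 = 0 :: (pvPs t 0).map (· + 1) := by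
        have h1 := pvPs_shift t 0
        rw [pvPs, PySem.List.enumerate_cons, List.filter_cons_of_pos (by simp [hc]), List.map_cons]
        show ((0 : Int), c).1 :: pvPs t (0 + 1) = _
        rw [h1]
      simp only [pvAux]
      rw [hNorm, hPs, pv_find_cons nt (pvNorm t) c hnt]
      by_cases hpre : nt <+: (c :: pvNorm t)
      · have hsw : PySem.Chars.startswith (c :: pvNorm t) nt = true := by
          rw [PySem.Chars.startswith_iff]; exact hpre
        rw [if_pos hsw, if_pos hpre]
        simp
      · have hsw : ¬ PySem.Chars.startswith (c :: pvNorm t) nt = true := by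
          rw [PySem.Chars.startswith_iff]; exact hpre
        rw [if_neg hsw, if_neg hpre]
        by_cases hptm : PySem.Chars.find (pvNorm t) nt = -1
        · rw [ih, if_pos hptm, if_pos hptm]
          simp
        · have hpt0 : 0 ≤ PySem.Chars.find (pvNorm t) nt := by
            have := PySem.Chars.neg_one_le_find (pvNorm t) nt; omega
          have h1 : ¬ (PySem.Chars.find (pvNorm t) nt + 1 = -1) := by omega
          have h2 : ¬ (PySem.Chars.find (pvNorm t) nt + 1 = 0) := by omega
          rw [if_neg hptm, if_neg h1, if_neg h2]
          have h3 : PySem.Chars.find (pvNorm t) nt + 1 - 1 = PySem.Chars.find (pvNorm t) nt := by ring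
          rw [h3]
          by_cases hptz : PySem.Chars.find (pvNorm t) nt = 0
          · -- match at normalized position 0: original index is this head, result 1
            have hv : pvAux nt t = 0 := by rw [ih, if_neg hptm, if_pos hptz]
            have hg : PySem.List.pyGet? (0 :: (pvPs t 0).map (· + 1)) (PySem.Chars.find (pvNorm t) nt)
                = some 0 := by
              rw [hptz]
              rw [show (0 : Int) = ((0 : Nat) : Int) by simp, PySem.List.pyGet?_natCast]
              rfl
            rw [hv, hg]
            norm_num
          · have hppos : 0 < PySem.Chars.find (pvNorm t) nt := by omega
            have hlen := pv_find_lt_length (pvNorm t) nt hnt hpt0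
            have hlt : (PySem.Chars.find (pvNorm t) nt).toNat - 1 < (pvPs t 0).length := by
              rw [pvPs_length]; omega
            have hget := pv_pyGet?_pos (pvPs t 0) _ hppos hlt
            have hw0 : 0 ≤ (pvPs t 0)[(PySem.Chars.find (pvNorm t) nt).toNat - 1] :=
              pvPs_nonneg t 0 le_rfl _ (List.getElem_mem _)
            have hv : pvAux nt t = (pvPs t 0)[(PySem.Chars.find (pvNorm t) nt).toNat - 1] + 1 := by
              rw [ih, if_neg hptm, if_neg hptz, hget]
              rfl
            have hk : PySem.Chars.find (pvNorm t) nt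
                = (((PySem.Chars.find (pvNorm t) nt).toNat - 1 : Nat) : Int) + 1 := by omega
            have hg := pv_pyGet?_cons_pos 0 (pvPs t 0) ((PySem.Chars.find (pvNorm t) nt).toNat - 1) hlt
            rw [← hk] at hg
            rw [hv, hg]
            have hne : ¬ ((pvPs t 0)[(PySem.Chars.find (pvNorm t) nt).toNat - 1] + 1 = -1) := by omega
            rw [if_neg hne]
            simp only [Option.getD_some]

-- ===== VERDICT (by name: the statement is the Claim_ definition above) =====
theorem find_title_substring_index_py_spec : Claim_equal_find_title_substring_index_py := by
  intro block_text title _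
  unfold Spec_find_title_substring_index_py
  unfold find_title_substring_index_py find_title_substring_index_py_alt
  have hnt : pvNorm (PySem.Str.strip title).toList
      = title.toList.filter (fun ch => !(PySem.Chars.isspace ch)) := by
    rw [PySem.Str.toList_strip, pvNorm_strip]; rfl
  simp only [hnt]
  by_cases h : title.toList.filter (fun ch => !(PySem.Chars.isspace ch)) = []
  · simp [h]
  · simp only [h, if_false]
    rw [pvLoopA_eq_pvAux _ h, pvAux_eq_altCore _ h]
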